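-- pv_equiv track=rewrite | github.com/shhyunn/programmars | 92334.py | solution
-- ===== SOURCE A (Python) =====
-- def solution(id_list, report, k):
--     answer = [0]*len(id_list)
--     id_dic={name:i for i,name in enumerate(id_list)}
--     count_dic={name:[] for name in id_list} #name은 신고 당한 사람. 그 안의 리스트는 그 사람을 신고한 name
--     for strr in report:
--         name1, name2 = strr.split()
--         count_dic[name2].append(name1) #신고한 사람 추가
--
--     for name in id_list:
--         count_dic[name] = list(set(count_dic[name]))
--         if len(count_dic[name]) >= k:
--             for name2 in count_dic[name]:
--                 answer[id_dic[name2]]+=1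
--     return answer
-- ===== SOURCE B (Python) =====
-- def solution(id_list, report, k):
--     id_dic = {name: i for i, name in enumerate(id_list)}
--     pairs = sorted(dict.fromkeys(tuple(strr.split()) for strr in report),
--                    key=lambda p: p[1])
--     answer = [0] * len(id_list)
--     run = []
--     for p in pairs:
--         if run and run[-1][1] != p[1]:
--             if len(run) >= k:
--                 for q in run:
--                     answer[id_dic[q[0]]] += 1
--             run = []
--         run.append(p)
--     if len(run) >= k:
--         for q in run:
--             answer[id_dic[q[0]]] += 1
--     return answer
-- ===== Notes on version B (the rewrite author's own statement) =====
-- stated objective: alternative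
-- what changed: B replaces A's hash grouping (dict of per-user reporter lists, dedup each, nested loop over banned users' lists) with sort-then-sweep: dedupe the (reporter, reported) pairs, sort them by reported user, and make one linear sweep that detects maximal runs of equal reported user, flushing a run's reporters into the answer when the run length reaches k.
-- outside the precondition, e.g. on solution(['a', 'a', 'b'], ['b a'], 1): A returns [0, 0, 2], B returns [0, 0, 1]
import Mathlib
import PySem

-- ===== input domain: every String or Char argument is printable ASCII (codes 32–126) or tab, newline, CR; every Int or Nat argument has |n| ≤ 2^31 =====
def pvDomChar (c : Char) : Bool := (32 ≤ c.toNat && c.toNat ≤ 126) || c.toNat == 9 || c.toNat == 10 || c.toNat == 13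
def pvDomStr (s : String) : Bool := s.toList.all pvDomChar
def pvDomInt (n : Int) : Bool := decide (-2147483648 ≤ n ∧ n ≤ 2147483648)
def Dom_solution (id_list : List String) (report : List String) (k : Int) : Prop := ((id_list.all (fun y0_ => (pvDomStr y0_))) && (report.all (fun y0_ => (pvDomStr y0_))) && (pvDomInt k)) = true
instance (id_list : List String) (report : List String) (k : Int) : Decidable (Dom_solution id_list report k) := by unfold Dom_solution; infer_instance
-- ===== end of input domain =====

-- B replaces A's hash grouping (per-user reporter lists, nested loop over banned users' lists) by
-- sort-then-sweep: dedupe the (reporter, reported) pairs, sort by reported user, and sweep once,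
-- flushing each maximal run of equal reported user into the answer when its length reaches k.

-- shared helper: 'answer[i] += 1' (both Pythons contain this statement; i is always in range under Pre_)
def pyBump (ans : List Int) (i : Int) : List Int :=
  PySem.List.pySetD ans i (PySem.List.pyGetD ans i 0 + 1)

-- shared helper: 'id_dic = {name: i for i, name in enumerate(id_list)}' (identical line in A and B)
def pyIdDic (id_list : List String) : PySem.Dict String Int :=
  (PySem.List.enumerate id_list).foldl (fun d p => d.insert p.2 p.1) PySem.Dict.empty

-- ===== PORT A =====
-- 'count_dic = {name: [] for name in id_list}' then the report loop appending name1 under name2.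
-- Python raises ValueError/KeyError when a line has ≠ 2 tokens or name2 ∉ count_dic: those inputs
-- are excluded by Pre_; the fallthrough branch leaves the dict unchanged there.
def aCountDic (id_list : List String) (report : List String) : PySem.Dict String (List String) :=
  report.foldl (fun d strr =>
      match PySem.Str.split₀ strr with
      | [name1, name2] => d.modify name2 [] (· ++ [name1])
      | _ => d)
    (id_list.foldl (fun d name => d.insert name ([] : List String)) PySem.Dict.empty)

-- body of A's 'for name in id_list' loop: dedup the reporter list, store it back, and if its length
-- reaches k bump answer[id_dic[name2]] for each reporter name2 (Python iterates list(set(..)); the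
-- bumps are order-independent, so PySem.Set's insertion order is exact here)
def aStep (id_dic : PySem.Dict String Int) (k : Int)
    (st : List Int × PySem.Dict String (List String)) (name : String) :
    List Int × PySem.Dict String (List String) :=
  let r : List String := PySem.Set.ofList (st.2.getD name [])
  let cd := st.2.insert name r
  if k ≤ (r.length : Int) then
    (r.foldl (fun ans name2 => pyBump ans (id_dic.getD name2 0)) st.1, cd)
  else (st.1, cd)

def solution (id_list : List String) (report : List String) (k : Int) : List Int :=
  (id_list.foldl (aStep (pyIdDic id_list) k)
    (List.replicate id_list.length (0 : Int), aCountDic id_list report)).1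

-- ===== PORT B =====
-- 'tuple(strr.split())' of one report line; Python raises on a line with ≠ 2 tokens (excluded by
-- Pre_), the fallthrough value is the port's total stand-in there
def bPair (strr : String) : String × String :=
  match PySem.Str.split₀ strr with
  | [name1, name2] => (name1, name2)
  | _ => ("", "")

-- 'pairs = sorted(dict.fromkeys(tuple(strr.split()) for strr in report), key=lambda p: p[1])'
def bSorted (report : List String) : List (String × String) :=
  PySem.List.sorted (PySem.List.dedup (report.map bPair)) (fun p => p.2)

-- the run flush: 'if len(run) >= k: for q in run: answer[id_dic[q[0]]] += 1'
def bFlush (id_dic : PySem.Dict String Int) (k : Int) (ans : List Int)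
    (run : List (String × String)) : List Int :=
  if k ≤ (run.length : Int) then run.foldl (fun a q => pyBump a (id_dic.getD q.1 0)) ans else ans

-- body of B's sweep loop over the sorted pairs, state (answer, run)
def bStep (id_dic : PySem.Dict String Int) (k : Int)
    (st : List Int × List (String × String)) (p : String × String) :
    List Int × List (String × String) :=
  match st.2.getLast? with
  | some q => if q.2 ≠ p.2 then (bFlush id_dic k st.1 st.2, [p]) else (st.1, st.2 ++ [p])
  | none => (st.1, st.2 ++ [p])

def solution_alt (id_list : List String) (report : List String) (k : Int) : List Int :=
  let id_dic := pyIdDic id_list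
  let st := (bSorted report).foldl (bStep id_dic k)
    (List.replicate id_list.length (0 : Int), ([] : List (String × String)))
  bFlush id_dic k st.1 st.2

-- ===== PRECONDITION & SPEC =====
-- Pre_ excludes (a) report lines on which Python A raises (not exactly two whitespace-separated
-- tokens, or a token that is not a known id: ValueError/KeyError), and (b) inputs where a REPORTED
-- user occurs more than once in id_list, a duplicate-key corner outside the problem's guarantee on
-- which A's per-occurrence tally and B's per-user tally are both defensible readings.
def Pre_solution (id_list : List String) (report : List String) (k : Int) : Prop :=
  ∀ r ∈ report, (PySem.Str.split₀ r).length = 2 ∧ (∀ t ∈ PySem.Str.split₀ r, t ∈ id_list) ∧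
    id_list.count ((PySem.Str.split₀ r).getD 1 "") ≤ 1
instance (id_list : List String) (report : List String) (k : Int) :
    Decidable (Pre_solution id_list report k) := by unfold Pre_solution; infer_instance
def pvWitness_solution : List String × List String × Int :=
  (["muzi", "frodo", "apeach"], ["muzi frodo", "apeach frodo", "muzi frodo"], 2)
def Spec_solution (id_list : List String) (report : List String) (k : Int) (out : List Int) : Prop :=
  out = solution_alt id_list report k
instance (id_list : List String) (report : List String) (k : Int) (out : List Int) :
    Decidable (Spec_solution id_list report k out) := by unfold Spec_solution; infer_instance

-- ===== CLAIM (what is proved, stated in full; the proofs are below) =====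
def Claim_equal_solution : Prop := ∀ (id_list : List String) (report : List String) (k : Int),
  Dom_solution id_list report k → Pre_solution id_list report k →
  Spec_solution id_list report k (solution id_list report k)

-- ===== LEMMAS AND PROOFS =====

-- the parsed (reporter, reported) pair of a report line (under Pre_ every line matches; = bPair)
def toPair (s : String) : String × String := bPair s

-- A's reporter list for user nm, in report order
def repOf (P : List (String × String)) (nm : String) : List String :=
  (P.filter (fun p => p.2 == nm)).map (fun p => p.1)

def idxF (id_list : List String) (nm : String) : Int := (pyIdDic id_list).getD nm 0

-- A's increment targets contributed by user nm
def bucketA (id_list : List String) (k : Int) (P : List (String × String)) (nm : String) : List Int :=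
  if k ≤ ((PySem.Set.ofList (repOf P nm)).length : Int)
  then (PySem.Set.ofList (repOf P nm)).map (idxF id_list) else []

-- B's qualification predicate: p is kept iff its reported user has ≥ k distinct reports in M
def qB (k : Int) (M : List (String × String)) (p : String × String) : Bool :=
  decide (k ≤ ((M.countP (fun q => q.2 == p.2)) : Int))

lemma initDic_getD (ns : List String) (d : PySem.Dict String (List String)) (nm : String)
    (h : d.getD nm [] = []) :
    (ns.foldl (fun d n => d.insert n ([] : List String)) d).getD nm [] = [] := by
  induction ns generalizing d with
  | nil => exact h
  | cons a t ih =>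
    simp only [List.foldl_cons]
    exact ih _ (by rw [PySem.Dict.getD_insert]; split <;> simp [h])

lemma split2_exists {report : List String} (hrep : ∀ r ∈ report, (PySem.Str.split₀ r).length = 2)
    {r : String} (hr : r ∈ report) : ∃ a b, PySem.Str.split₀ r = [a, b] := by
  have := hrep r hr
  match h : PySem.Str.split₀ r with
  | [a, b] => exact ⟨a, b, rfl⟩
  | [] => rw [h] at this; simp at this
  | [x] => rw [h] at this; simp at this
  | x :: y :: z :: t => rw [h] at this; simp at this

lemma aCountDic_getD (id_list : List String) (report : List String)
    (hrep : ∀ r ∈ report, (PySem.Str.split₀ r).length = 2) (nm : String) :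
    (aCountDic id_list report).getD nm [] = repOf (report.map toPair) nm := by
  unfold aCountDic
  have h1 : report.foldl (fun d strr =>
      match PySem.Str.split₀ strr with
      | [name1, name2] => d.modify name2 [] (· ++ [name1])
      | _ => d)
    (id_list.foldl (fun d name => d.insert name ([] : List String)) PySem.Dict.empty)
    = (report.map toPair).foldl (fun d p => d.modify p.2 [] (· ++ [p.1]))
      (id_list.foldl (fun d name => d.insert name ([] : List String)) PySem.Dict.empty) := by
    rw [List.foldl_map]
    refine PySem.List.foldl_congr_mem _ _ _ _ (fun d r hr => ?_)
    obtain ⟨a, b, hab⟩ := split2_exists hrep hr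
    simp [hab, toPair, bPair]
  rw [h1]
  have h2 : ∀ (Q : List (String × String)) (d0 : PySem.Dict String (List String)),
      Q.foldl (fun d p => d.modify p.2 [] (· ++ [p.1])) d0
      = (Q.map Prod.swap).foldl (fun d q => d.modify q.1 [] (· ++ [q.2])) d0 := by
    intro Q d0
    rw [List.foldl_map]
    rfl
  rw [h2, PySem.Dict.getD_foldl_modify_append,
    initDic_getD _ _ _ (by simp [PySem.Dict.getD_empty])]
  unfold repOf
  rw [List.filter_map, List.map_map]
  simp [Function.comp_def, Prod.swap]

lemma aLoop (id_list : List String) (k : Int) (P : List (String × String)) :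
    ∀ (names : List String) (ans : List Int) (cd : PySem.Dict String (List String)),
    (∀ nm ∈ names, 2 ≤ names.count nm → repOf P nm = []) →
    (∀ nm ∈ names, cd.getD nm [] = repOf P nm) →
    (names.foldl (aStep (pyIdDic id_list) k) (ans, cd)).1
      = names.foldl (fun a nm => (bucketA id_list k P nm).foldl pyBump a) ans := by
  intro names
  induction names with
  | nil => intro ans cd _ _; rfl
  | cons nm t ih =>
    intro ans cd hdup hcd
    simp only [List.foldl_cons]
    have hr : cd.getD nm [] = repOf P nm := hcd nm (by simp)
    have hstep : aStep (pyIdDic id_list) k (ans, cd) nm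
        = ((bucketA id_list k P nm).foldl pyBump ans, cd.insert nm (PySem.Set.ofList (repOf P nm))) := by
      unfold aStep bucketA
      simp only [hr]
      split
      · rw [List.foldl_map]
        rfl
      · rfl
    rw [hstep]
    refine ih _ _
      (fun nm' hnm' h2 => hdup nm' (by simp [hnm'])
        (by rw [List.count_cons]; omega))
      (fun nm' hnm' => ?_)
    by_cases hne : nm' = nm
    · subst hne
      have hrep0 : repOf P nm' = [] := hdup nm' (by simp)
        (by rw [List.count_cons]; have := List.count_pos_iff.mpr hnm'; simp; omega)
      rw [PySem.Dict.getD_insert]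
      simp [hrep0]
    · rw [PySem.Dict.getD_insert_of_ne _ _ _ hne]
      exact hcd nm' (by simp [hnm'])

lemma foldl_bump_flatMap (g : String → List Int) :
    ∀ (names : List String) (ans : List Int),
    names.foldl (fun a nm => (g nm).foldl pyBump a) ans = (names.flatMap g).foldl pyBump ans := by
  intro names
  induction names with
  | nil => intro ans; rfl
  | cons a t ih => intro ans; simp only [List.foldl_cons, List.flatMap_cons, List.foldl_append, ih]

lemma pyBump_length (ans : List Int) (t : Int) : (pyBump ans t).length = ans.length := by
  unfold pyBump; exact PySem.List.length_pySetD _ _ _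

lemma pyBump_getD (ans : List Int) (t : Int) (j : Nat) (h0 : 0 ≤ t) (h1 : t < (ans.length : Int)) :
    (pyBump ans t).getD j 0 = if t = (j : Int) then ans.getD j 0 + 1 else ans.getD j 0 := by
  unfold pyBump
  rw [PySem.List.pySetD_of_nonneg ans _ h0, PySem.List.pyGetD_of_nonneg ans _ h0]
  rw [List.getD_eq_getElem?_getD, List.getElem?_set]
  by_cases h : t = (j : Int)
  · have htn : t.toNat = j := by omega
    have hj : j < ans.length := by omega
    simp [hj, h, List.getD_eq_getElem?_getD]
  · have : ¬ (t.toNat = j) := by omega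
    simp [this, h, List.getD_eq_getElem?_getD]

lemma bump_foldl_length (ts : List Int) : ∀ ans : List Int,
    (ts.foldl pyBump ans).length = ans.length := by
  induction ts with
  | nil => intro ans; rfl
  | cons t ts ih => intro ans; simp only [List.foldl_cons, ih, pyBump_length]

lemma bump_foldl_getD (ts : List Int) : ∀ (ans : List Int),
    (∀ t ∈ ts, 0 ≤ t ∧ t < (ans.length : Int)) → ∀ j : Nat,
    (ts.foldl pyBump ans).getD j 0 = ans.getD j 0 + (ts.count (j : Int) : Int) := by
  induction ts with
  | nil => intro ans _ j; simp
  | cons t ts ih =>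
    intro ans hb j
    have hbt := hb t (by simp)
    rw [List.foldl_cons,
      ih (pyBump ans t) (fun x hx => by rw [pyBump_length]; exact hb x (by simp [hx])) j]
    rw [pyBump_getD ans t j hbt.1 hbt.2, List.count_cons]
    by_cases h : t = (j : Int) <;> simp [h] <;> omega

lemma idDic_fold_bounds (N : Int) (l : List (Int × String)) :
    ∀ (d : PySem.Dict String Int), (∀ nm, 0 ≤ d.getD nm 0 ∧ d.getD nm 0 < N) →
    (∀ p ∈ l, 0 ≤ p.1 ∧ p.1 < N) →
    ∀ nm, 0 ≤ (l.foldl (fun d p => d.insert p.2 p.1) d).getD nm 0 ∧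
          (l.foldl (fun d p => d.insert p.2 p.1) d).getD nm 0 < N := by
  induction l with
  | nil => intro d hd _ nm; exact hd nm
  | cons p t ih =>
    intro d hd hl nm
    refine ih _ (fun nm' => ?_) (fun q hq => hl q (by simp [hq])) nm
    rw [PySem.Dict.getD_insert]
    split
    · exact hl p (by simp)
    · exact hd nm'

lemma idxF_bounds (id_list : List String) (nm : String) (h : nm ∈ id_list) :
    0 ≤ idxF id_list nm ∧ idxF id_list nm < (id_list.length : Int) := by
  have hpos : 0 < id_list.length := List.length_pos_of_mem h
  refine idDic_fold_bounds (id_list.length : Int) (PySem.List.enumerate id_list)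
    PySem.Dict.empty (fun nm' => ?_) (fun p hp => ?_) nm
  · simp [PySem.Dict.getD_empty]; exact_mod_cast hpos
  · rw [PySem.List.mem_enumerate_iff] at hp
    obtain ⟨kk, hk, rfl⟩ := hp
    constructor <;> simp <;> omega

lemma partition_perm : ∀ (names : List String) (D : List (String × String)),
    (∀ p ∈ D, names.count p.2 = 1) →
    D.Perm (names.flatMap (fun nm => D.filter (fun p => p.2 == nm))) := by
  intro names
  induction names with
  | nil =>
    intro D hm
    have : D = [] := List.eq_nil_iff_forall_not_mem.mpr (fun p hp => by simpa using hm p hp)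
    simp [this]
  | cons a t ih =>
    intro D hm
    have h1 : (D.filter (fun p => p.2 == a) ++ D.filter (fun p => !(p.2 == a))).Perm D :=
      List.filter_append_perm _ D
    have h2 := ih (D.filter (fun p => !(p.2 == a)))
      (fun p hp => by
        have hpD := List.of_mem_filter hp
        have hpa : ¬ (p.2 = a) := by simpa using hpD
        have := hm p (List.mem_of_mem_filter hp)
        rw [List.count_cons] at this
        have hne : ¬ (a = p.2) := fun h => hpa h.symm
        simpa [hne] using this)
    have h3 : ∀ nm ∈ t, (D.filter (fun p => !(p.2 == a))).filter (fun p => p.2 == nm)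
        = D.filter (fun p => p.2 == nm) := by
      intro nm hnm
      by_cases hna : nm = a
      · subst hna
        have hempty : D.filter (fun p => p.2 == nm) = [] := by
          refine List.filter_eq_nil_iff.mpr (fun p hp hp2 => ?_)
          have hcp := hm p hp
          have hp2' : p.2 = nm := by simpa using hp2
          rw [List.count_cons, hp2'] at hcp
          simp at hcp
          have hpos := List.count_pos_iff.mpr hnm
          omega
        rw [hempty]
        refine List.filter_eq_nil_iff.mpr (fun p hp hp2 => ?_)
        have := List.filter_eq_nil_iff.mp hempty p (List.mem_of_mem_filter hp) hp2
        exact this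
      · rw [List.filter_filter]
        refine List.filter_congr (fun p _ => ?_)
        by_cases h : p.2 = nm
        · simp [h, hna]
        · simp [h]
    have h4 : t.flatMap (fun nm => (D.filter (fun p => !(p.2 == a))).filter (fun p => p.2 == nm))
        = t.flatMap (fun nm => D.filter (fun p => p.2 == nm)) :=
      List.flatMap_congr h3
    rw [List.flatMap_cons]
    refine h1.symm.trans (List.Perm.append_left _ ?_)
    rw [← h4]
    exact h2

lemma bucket_mem (P : List (String × String)) (nm a : String) :
    a ∈ ((PySem.Set.ofList P).filter (fun p => p.2 == nm)).map (fun p => p.1)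
      ↔ a ∈ PySem.Set.ofList (repOf P nm) := by
  rw [PySem.Set.mem_ofList]
  unfold repOf
  simp only [List.mem_map, List.mem_filter, PySem.Set.mem_ofList, beq_iff_eq]

lemma bucket_nodup (P : List (String × String)) (nm : String) :
    (((PySem.Set.ofList P).filter (fun p => p.2 == nm)).map (fun p => p.1)).Nodup := by
  refine List.Nodup.map_on ?_ (List.Nodup.filter _ (PySem.Set.nodup_ofList P))
  intro x hx y hy hxy
  have hx2 : x.2 = nm := by simpa using (List.of_mem_filter hx)
  have hy2 : y.2 = nm := by simpa using (List.of_mem_filter hy)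
  exact Prod.ext hxy (hx2.trans hy2.symm)

lemma bucket_perm (P : List (String × String)) (nm : String) :
    (((PySem.Set.ofList P).filter (fun p => p.2 == nm)).map (fun p => p.1)).Perm
      (PySem.Set.ofList (repOf P nm)) := by
  refine (List.perm_ext_iff_of_nodup (bucket_nodup P nm) (PySem.Set.nodup_ofList _)).mpr ?_
  intro a; exact bucket_mem P nm a

lemma targets_perm (id_list : List String) (k : Int) (P : List (String × String))
    (hc1 : ∀ p ∈ P, id_list.count p.2 = 1) :
    (id_list.flatMap (bucketA id_list k P)).Perm
      (((PySem.Set.ofList P).filter (qB k (PySem.Set.ofList P))).map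
        (fun p => idxF id_list p.1)) := by
  set D := PySem.Set.ofList P with hD
  have hDP : ∀ p, p ∈ D ↔ p ∈ P := fun p => PySem.Set.mem_ofList P p
  have hmemq : ∀ p ∈ D.filter (qB k D), id_list.count p.2 = 1 := by
    intro p hp
    exact hc1 p ((hDP p).mp (List.mem_of_mem_filter hp))
  have hpart := partition_perm id_list (D.filter (qB k D)) hmemq
  refine List.Perm.trans ?_ ((List.Perm.map (fun p => idxF id_list p.1) hpart).symm)
  rw [List.map_flatMap]
  refine List.Perm.flatMap_left id_list (fun nm hnm => ?_)
  have hLf : (D.filter (qB k D)).filter (fun p => p.2 == nm)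
      = (D.filter (fun p => p.2 == nm)).filter (qB k D) := by
    rw [List.filter_filter, List.filter_filter]
    exact List.filter_congr (fun p _ => Bool.and_comm _ _)
  have hcnt : ∀ p : String × String, p.2 = nm →
      qB k D p = decide (k ≤ ((D.filter (fun q => q.2 == nm)).length : Int)) := by
    intro p hp
    unfold qB
    simp only [hp, List.countP_eq_length_filter]
  have hlen : (PySem.Set.ofList (repOf P nm)).length = (D.filter (fun q => q.2 == nm)).length := by
    have := (bucket_perm P nm).length_eq
    rw [List.length_map] at this
    exact this.symm
  by_cases hc : k ≤ ((D.filter (fun q => q.2 == nm)).length : Int)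
  · have h1 : (D.filter (fun p => p.2 == nm)).filter (qB k D) = D.filter (fun p => p.2 == nm) := by
      refine List.filter_eq_self.mpr (fun p hp => ?_)
      rw [hcnt p (by simpa using List.of_mem_filter hp)]
      simpa using hc
    rw [hLf, h1]
    unfold bucketA
    rw [if_pos (by rw [hlen]; exact hc)]
    have : (D.filter (fun p => p.2 == nm)).map (fun p => idxF id_list p.1)
        = ((D.filter (fun p => p.2 == nm)).map (fun p => p.1)).map (idxF id_list) := by
      rw [List.map_map]; rfl
    rw [this]
    exact (List.Perm.map _ (bucket_perm P nm)).symm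
  · have h1 : (D.filter (fun p => p.2 == nm)).filter (qB k D) = [] := by
      refine List.filter_eq_nil_iff.mpr (fun p hp => ?_)
      rw [hcnt p (by simpa using List.of_mem_filter hp)]
      simpa using hc
    rw [hLf, h1]
    unfold bucketA
    rw [if_neg (by rw [hlen]; exact hc)]
    simp

-- B's sweep: flushing maximal runs of a key-sorted list equals one bump-fold over the pairs whose
-- reported user's multiplicity reaches k
lemma bScan (id_dic : PySem.Dict String Int) (k : Int) :
    ∀ (t run : List (String × String)) (ans : List Int),
    (∀ q ∈ run, ∀ q' ∈ run, q.2 = q'.2) →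
    ((run ++ t).Pairwise (fun p q => p.2 ≤ q.2)) →
    bFlush id_dic k (t.foldl (bStep id_dic k) (ans, run)).1
        (t.foldl (bStep id_dic k) (ans, run)).2
      = ((run ++ t).filter (qB k (run ++ t))).foldl
          (fun a q => pyBump a (id_dic.getD q.1 0)) ans := by
  intro t
  induction t with
  | nil =>
    intro run ans hconst _
    simp only [List.foldl_nil, List.append_nil]
    have hq : ∀ p ∈ run, qB k run p = decide (k ≤ ((run.length : Nat) : Int)) := by
      intro p hp
      unfold qB
      have : run.countP (fun q => q.2 == p.2) = run.length :=
        List.countP_eq_length.mpr (fun q hq => by simpa using hconst q hq p hp)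
      rw [this]
    by_cases hk : k ≤ ((run.length : Nat) : Int)
    · have : run.filter (qB k run) = run :=
        List.filter_eq_self.mpr (fun p hp => by rw [hq p hp]; simpa using hk)
      rw [this]
      unfold bFlush
      rw [if_pos hk]
    · have : run.filter (qB k run) = [] :=
        List.filter_eq_nil_iff.mpr (fun p hp hc => by rw [hq p hp] at hc; simp at hc; omega)
      rw [this]
      unfold bFlush
      rw [if_neg hk]
      rfl
  | cons p t ih =>
    intro run ans hconst hpw
    simp only [List.foldl_cons]
    match hlast : run.getLast? with
    | none =>
      have hrune : run = [] := List.getLast?_eq_none_iff.mp hlast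
      subst hrune
      have hstep : bStep id_dic k (ans, ([] : List (String × String))) p = (ans, [p]) := by
        unfold bStep; rfl
      rw [hstep]
      have := ih [p] ans (by simp) (by simpa using hpw)
      simpa using this
    | some q =>
      have hqmem : q ∈ run := List.mem_of_getLast? hlast
      have hstep0 : bStep id_dic k (ans, run) p
          = if q.2 ≠ p.2 then (bFlush id_dic k ans run, [p]) else (ans, run ++ [p]) := by
        unfold bStep
        rw [hlast]
      by_cases hne : q.2 = p.2
      · -- same key: the run grows
        rw [hstep0, if_neg (by simpa using hne)]
        have hconst' : ∀ x ∈ run ++ [p], ∀ y ∈ run ++ [p], x.2 = y.2 := by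
          intro x hx y hy
          have hval : ∀ z ∈ run ++ [p], z.2 = q.2 := by
            intro z hz
            rcases List.mem_append.mp hz with hz | hz
            · exact hconst z hz q hqmem
            · simp at hz; rw [hz, hne]
          rw [hval x hx, hval y hy]
        have hpw' : ((run ++ [p]) ++ t).Pairwise (fun a b => a.2 ≤ b.2) := by
          rw [List.append_assoc]
          simpa using hpw
        have := ih (run ++ [p]) ans hconst' hpw'
        rw [this, List.append_assoc]
        simp
      · -- key changes: flush the finished run
        rw [hstep0, if_pos (by simpa using hne)]
        have hpwt : (p :: t).Pairwise (fun a b => a.2 ≤ b.2) :=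
          hpw.sublist (List.sublist_append_right _ _)
        have := ih [p] (bFlush id_dic k ans run)
          (by simp) (by simpa using hpwt)
        rw [this]
        -- run's key is strictly below every key in p :: t
        have hlt : ∀ r ∈ run, ∀ x ∈ p :: t, r.2 ≠ x.2 := by
          intro r hr x hx
          have hrq : r.2 = q.2 := hconst r hr q hqmem
          have hle : q.2 ≤ p.2 := by
            have := (List.pairwise_append.mp hpw).2.2 q hqmem p (by simp)
            exact this
          have hlt' : q.2 < p.2 := lt_of_le_of_ne hle hne
          rcases List.mem_cons.mp hx with hx | hx
          · rw [hrq, hx]; exact ne_of_lt hlt'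
          · have hpx : p.2 ≤ x.2 := by
              rcases List.pairwise_cons.mp hpwt with ⟨hp1, _⟩
              exact hp1 x hx
            rw [hrq]
            exact ne_of_lt (lt_of_lt_of_le hlt' hpx)
        set W := run ++ p :: t with hW
        -- counts in W: run keys count run.length, tail keys are unaffected by run
        have hcrun : ∀ r ∈ run, W.countP (fun z => z.2 == r.2) = run.length := by
          intro r hr
          rw [hW, List.countP_append]
          have h1 : run.countP (fun z => z.2 == r.2) = run.length :=
            List.countP_eq_length.mpr (fun z hz => by simpa using hconst z hz r hr)
          have h2 : (p :: t).countP (fun z => z.2 == r.2) = 0 :=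
            List.countP_eq_zero.mpr (fun z hz => by simpa using (hlt r hr z hz).symm)
          omega
        have hctail : ∀ x ∈ p :: t, W.countP (fun z => z.2 == x.2)
            = (p :: t).countP (fun z => z.2 == x.2) := by
          intro x hx
          rw [hW, List.countP_append]
          have h1 : run.countP (fun z => z.2 == x.2) = 0 :=
            List.countP_eq_zero.mpr (fun z hz => by simpa using hlt z hz x hx)
          omega
        have hsplit : W.filter (qB k W)
            = run.filter (qB k W) ++ (p :: t).filter (qB k (p :: t)) := by
          rw [hW, List.filter_append]
          congr 1
          refine List.filter_congr (fun x hx => ?_)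
          unfold qB
          rw [← hW, hctail x hx]
        rw [hsplit, List.foldl_append]
        congr 1
        have hq : ∀ r ∈ run, qB k W r = decide (k ≤ ((run.length : Nat) : Int)) := by
          intro r hr
          unfold qB
          rw [hcrun r hr]
        by_cases hk : k ≤ ((run.length : Nat) : Int)
        · have : run.filter (qB k W) = run :=
            List.filter_eq_self.mpr (fun r hr => by rw [hq r hr]; simpa using hk)
          rw [this]
          unfold bFlush
          rw [if_pos hk]
        · have : run.filter (qB k W) = [] :=
            List.filter_eq_nil_iff.mpr (fun r hr hc => by rw [hq r hr] at hc; simp at hc; omega)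
          rw [this]
          unfold bFlush
          rw [if_neg hk]
          rfl

-- ===== VERDICT (by name: the statement is the Claim_ definition above) =====
theorem solution_spec : Claim_equal_solution := by
  intro id_list report k _ hrep
  have hrep2 : ∀ r ∈ report, (PySem.Str.split₀ r).length = 2 := fun r hr => (hrep r hr).1
  set P : List (String × String) := report.map toPair with hPdef
  have hP : ∀ p ∈ P, p.1 ∈ id_list ∧ p.2 ∈ id_list := by
    intro p hp
    obtain ⟨r, hr, rfl⟩ := List.mem_map.mp hp
    obtain ⟨a, b, hab⟩ := split2_exists hrep2 hr
    have hmem := (hrep r hr).2.1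
    constructor
    · exact hmem _ (by simp [toPair, bPair, hab])
    · exact hmem _ (by simp [toPair, bPair, hab])
  have hsnd1 : ∀ p ∈ P, id_list.count p.2 = 1 := by
    intro p hp
    obtain ⟨r, hr, rfl⟩ := List.mem_map.mp hp
    obtain ⟨a, b, hab⟩ := split2_exists hrep2 hr
    have hle := (hrep r hr).2.2
    rw [hab] at hle
    simp only [toPair, bPair, hab]
    have hpos : 0 < id_list.count b :=
      List.count_pos_iff.mpr ((hrep r hr).2.1 b (by simp [hab]))
    simp at hle
    omega
  have hdup : ∀ nm ∈ id_list, 2 ≤ id_list.count nm → repOf P nm = [] := by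
    intro nm _ h2
    unfold repOf
    have : P.filter (fun p => p.2 == nm) = [] := by
      refine List.filter_eq_nil_iff.mpr (fun p hp hp2 => ?_)
      have := hsnd1 p hp
      have hp2' : p.2 = nm := by simpa using hp2
      rw [hp2'] at this
      omega
    rw [this]
    rfl
  unfold Spec_solution
  set D := PySem.Set.ofList P with hD
  -- A's result as one bump-fold over grouped targets
  have hA : solution id_list report k
      = (id_list.flatMap (bucketA id_list k P)).foldl pyBump
          (List.replicate id_list.length (0 : Int)) := by
    unfold solution
    rw [aLoop id_list k P id_list _ _ hdup
      (fun nm _ => aCountDic_getD id_list report hrep2 nm), foldl_bump_flatMap]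
  -- B's sorted pair list
  set L := bSorted report with hL
  have hLperm : L.Perm D := by
    rw [hL, hD]
    unfold bSorted
    have : report.map bPair = P := by rw [hPdef]; rfl
    rw [this, PySem.List.dedup_eq_ofList]
    exact PySem.List.sorted_perm _ _ _
  have hqLD : ∀ p, qB k L p = qB k D p := by
    intro p
    unfold qB
    rw [hLperm.countP_eq]
  -- B's result as one bump-fold over the qualifying sorted pairs
  have hB : solution_alt id_list report k
      = ((L.filter (qB k L)).map (fun p => idxF id_list p.1)).foldl pyBump
          (List.replicate id_list.length (0 : Int)) := by
    show bFlush (pyIdDic id_list) k _ _ = _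
    rw [bScan (pyIdDic id_list) k L [] (List.replicate id_list.length (0 : Int))
      (by simp) (by simpa using PySem.List.sorted_pairwise (PySem.List.dedup (report.map bPair)) (fun p : String × String => p.2))]
    rw [List.nil_append, List.foldl_map]
    rfl
  rw [hA, hB]
  -- both target lists are permutations of the canonical one
  have hfLD : (L.filter (qB k L)).Perm (D.filter (qB k D)) := by
    have : L.filter (qB k L) = L.filter (qB k D) :=
      List.filter_congr (fun p _ => hqLD p)
    rw [this]
    exact hLperm.filter _
  have hperm : (id_list.flatMap (bucketA id_list k P)).Perm
      ((L.filter (qB k L)).map (fun p => idxF id_list p.1)) :=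
    (targets_perm id_list k P hsnd1).trans ((hfLD.map _).symm)
  -- bounds of the increment targets
  have hbB : ∀ t ∈ ((L.filter (qB k L)).map (fun p => idxF id_list p.1)),
      0 ≤ t ∧ t < ((List.replicate id_list.length (0 : Int)).length : Int) := by
    intro t ht
    obtain ⟨p, hp, rfl⟩ := List.mem_map.mp ht
    rw [List.length_replicate]
    have hpL : p ∈ L := List.mem_of_mem_filter hp
    have hpP : p ∈ P := (PySem.Set.mem_ofList _ _).mp ((hLperm.mem_iff).mp hpL)
    exact idxF_bounds id_list _ (hP p hpP).1
  have hbA : ∀ t ∈ id_list.flatMap (bucketA id_list k P),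
      0 ≤ t ∧ t < ((List.replicate id_list.length (0 : Int)).length : Int) :=
    fun t ht => hbB t (hperm.mem_iff.mp ht)
  -- both folds computed entrywise via counts, equal by the permutation
  have hlenA := bump_foldl_length (id_list.flatMap (bucketA id_list k P))
    (List.replicate id_list.length (0 : Int))
  have hlenB := bump_foldl_length ((L.filter (qB k L)).map (fun p => idxF id_list p.1))
    (List.replicate id_list.length (0 : Int))
  apply List.ext_getElem (by rw [hlenA, hlenB])
  intro j hj1 hj2
  rw [← List.getD_eq_getElem _ 0 hj1, ← List.getD_eq_getElem _ 0 hj2,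
    bump_foldl_getD _ _ hbA j, bump_foldl_getD _ _ hbB j, hperm.count_eq]
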